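-- pv_equiv track=rewrite | github.com/htang7415/Code-Lab | modules/ml/systems/expert-parallelism/python/expert_parallelism.py | expert_parallel_dispatch_stats
-- ===== SOURCE A (Python) =====
-- def expert_parallel_dispatch_stats(
--     token_home_shards: list[int],
--     expert_assignments: list[int],
--     experts_per_shard: int,
-- ) -> tuple[list[int], int]:
--     if len(token_home_shards) != len(expert_assignments):
--         raise ValueError("token_home_shards and expert_assignments must have the same length")
--     if experts_per_shard <= 0:
--         raise ValueError("experts_per_shard must be positive")
--     if any(shard < 0 for shard in token_home_shards):
--         raise ValueError("token_home_shards must be non-negative")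
--     if any(expert < 0 for expert in expert_assignments):
--         raise ValueError("expert_assignments must be non-negative")
--     if not token_home_shards:
--         return [], 0
--
--     max_target_shard = max(expert // experts_per_shard for expert in expert_assignments)
--     num_shards = max(max(token_home_shards), max_target_shard) + 1
--
--     load_per_shard = [0] * num_shards
--     remote_dispatches = 0
--
--     for home_shard, expert in zip(token_home_shards, expert_assignments):
--         target_shard = expert // experts_per_shard
--         load_per_shard[target_shard] += 1
--         if target_shard != home_shard:
--             remote_dispatches += 1
--
--     return load_per_shard, remote_dispatches
-- ===== SOURCE B (Python) =====
-- def expert_parallel_dispatch_stats(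
--     token_home_shards: list[int],
--     expert_assignments: list[int],
--     experts_per_shard: int,
-- ) -> tuple[list[int], int]:
--     if len(token_home_shards) != len(expert_assignments):
--         raise ValueError("token_home_shards and expert_assignments must have the same length")
--     if experts_per_shard <= 0:
--         raise ValueError("experts_per_shard must be positive")
--     if any(shard < 0 for shard in token_home_shards):
--         raise ValueError("token_home_shards must be non-negative")
--     if any(expert < 0 for expert in expert_assignments):
--         raise ValueError("expert_assignments must be non-negative")
--     if not token_home_shards:
--         return [], 0
--
--     targets = [expert // experts_per_shard for expert in expert_assignments]
--     num_shards = max(max(token_home_shards), max(targets)) + 1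
--
--     # sort-then-sweep histogram: consume runs of equal targets shard by shard
--     ordered = sorted(targets)
--     load_per_shard = []
--     i = 0
--     n = len(ordered)
--     for shard in range(num_shards):
--         start = i
--         while i < n and ordered[i] == shard:
--             i += 1
--         load_per_shard.append(i - start)
--
--     local = sum(1 for home, target in zip(token_home_shards, targets) if home == target)
--     remote_dispatches = len(token_home_shards) - local
--     return load_per_shard, remote_dispatches
-- ===== Notes on version B (the rewrite author's own statement) =====
-- stated objective: alternative
-- what changed: A's fused single pass that bumps a preallocated histogram per token is replaced by a sort-then-sweep: targets are materialised and sorted, the per-shard loads are read off by consuming runs of equal values with an index pointer over the sorted list, and remote dispatches are computed as n minus the count of local dispatches.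
import Mathlib
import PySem

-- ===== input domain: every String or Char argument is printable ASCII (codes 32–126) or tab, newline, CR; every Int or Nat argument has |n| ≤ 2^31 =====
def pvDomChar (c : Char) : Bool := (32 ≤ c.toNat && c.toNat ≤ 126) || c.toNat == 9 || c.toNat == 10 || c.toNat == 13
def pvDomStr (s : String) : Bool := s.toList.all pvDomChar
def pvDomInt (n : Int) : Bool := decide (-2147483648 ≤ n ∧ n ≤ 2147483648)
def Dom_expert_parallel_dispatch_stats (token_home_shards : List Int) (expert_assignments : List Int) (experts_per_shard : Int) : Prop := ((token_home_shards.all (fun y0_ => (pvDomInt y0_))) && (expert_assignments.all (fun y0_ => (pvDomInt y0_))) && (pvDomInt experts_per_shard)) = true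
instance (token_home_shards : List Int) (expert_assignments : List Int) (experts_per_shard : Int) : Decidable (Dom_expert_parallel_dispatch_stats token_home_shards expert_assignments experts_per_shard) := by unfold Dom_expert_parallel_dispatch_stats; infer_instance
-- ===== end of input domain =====

-- B replaces A's fused bump-a-histogram loop by a sort-then-sweep: targets are sorted and
-- the per-shard loads read off by consuming runs of equal values; remote = n - local matches.

-- ===== PORT A =====
-- literal port of A: fused loop over zip, mutating load_per_shard and remote_dispatches.
def expert_parallel_dispatch_stats (token_home_shards : List Int) (expert_assignments : List Int) (experts_per_shard : Int) : List Int × Int :=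
  if token_home_shards = [] then ([], 0)
  else
    let max_target_shard : Int :=
      (PySem.List.max? (expert_assignments.map (fun e => PySem.Int.floordiv e experts_per_shard)) (fun y => y)).getD 0
    let num_shards : Int :=
      max ((PySem.List.max? token_home_shards (fun y => y)).getD 0) max_target_shard + 1
    (token_home_shards.zip expert_assignments).foldl
      (fun st p =>
        let t := PySem.Int.floordiv p.2 experts_per_shard
        (st.1.set t.toNat (st.1.getD t.toNat 0 + 1),
         if t ≠ p.1 then st.2 + 1 else st.2))
      (List.replicate num_shards.toNat (0 : Int), 0)

-- ===== PORT B =====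
-- inner while loop of Source B: advance the pointer past the run of values equal to `shard`;
-- the consumed remainder of the sorted list plays the role of the index i.
def pvRun (shard : Int) : List Int → Nat × List Int
  | [] => (0, [])
  | x :: xs =>
    if x = shard then
      let r := pvRun shard xs
      (r.1 + 1, r.2)
    else (0, x :: xs)

def expert_parallel_dispatch_stats_alt (token_home_shards : List Int) (expert_assignments : List Int) (experts_per_shard : Int) : List Int × Int :=
  if token_home_shards = [] then ([], 0)
  else
    let targets := expert_assignments.map (fun e => PySem.Int.floordiv e experts_per_shard)
    let num_shards : Int :=
      max ((PySem.List.max? token_home_shards (fun y => y)).getD 0)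
          ((PySem.List.max? targets (fun y => y)).getD 0) + 1
    let ordered := PySem.List.sorted targets (fun y => y) false
    let load_per_shard :=
      ((PySem.List.pyRange 0 num_shards 1).foldl
        (fun st shard =>
          let r := pvRun shard st.2
          (st.1 ++ [(r.1 : Int)], r.2))
        (([] : List Int), ordered)).1
    let localCnt : Int := ((token_home_shards.zip targets).countP (fun p => p.1 == p.2) : Int)
    (load_per_shard, (token_home_shards.length : Int) - localCnt)

-- ===== PRECONDITION & SPEC =====
-- Pre_ is exactly where the Python A returns: equal lengths, positive experts_per_shard,
-- and non-negative entries (otherwise A raises ValueError).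
def Pre_expert_parallel_dispatch_stats (token_home_shards : List Int) (expert_assignments : List Int) (experts_per_shard : Int) : Prop :=
  token_home_shards.length = expert_assignments.length ∧ 0 < experts_per_shard ∧
  (∀ s ∈ token_home_shards, 0 ≤ s) ∧ (∀ e ∈ expert_assignments, 0 ≤ e)
instance (token_home_shards : List Int) (expert_assignments : List Int) (experts_per_shard : Int) : Decidable (Pre_expert_parallel_dispatch_stats token_home_shards expert_assignments experts_per_shard) := by unfold Pre_expert_parallel_dispatch_stats; infer_instance

def pvWitness_expert_parallel_dispatch_stats : List Int × List Int × Int := ([0, 1, 0], [1, 2, 5], 2)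

def Spec_expert_parallel_dispatch_stats (token_home_shards : List Int) (expert_assignments : List Int) (experts_per_shard : Int) (out : List Int × Int) : Prop := out = expert_parallel_dispatch_stats_alt token_home_shards expert_assignments experts_per_shard
instance (token_home_shards : List Int) (expert_assignments : List Int) (experts_per_shard : Int) (out : List Int × Int) : Decidable (Spec_expert_parallel_dispatch_stats token_home_shards expert_assignments experts_per_shard out) := by unfold Spec_expert_parallel_dispatch_stats; infer_instance

-- ===== CLAIM (what is proved, stated in full; the proofs are below) =====
def Claim_equal_expert_parallel_dispatch_stats : Prop := ∀ (token_home_shards : List Int) (expert_assignments : List Int) (experts_per_shard : Int), Dom_expert_parallel_dispatch_stats token_home_shards expert_assignments experts_per_shard → Pre_expert_parallel_dispatch_stats token_home_shards expert_assignments experts_per_shard → Spec_expert_parallel_dispatch_stats token_home_shards expert_assignments experts_per_shard (expert_parallel_dispatch_stats token_home_shards expert_assignments experts_per_shard)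

-- ===== LEMMAS AND PROOFS =====

-- A's histogram loop: set-increment at index t.toNat; characterised by List.count.
lemma bump_foldl_length (ts : List Int) (l : List Int) :
    (ts.foldl (fun l t => l.set t.toNat (l.getD t.toNat 0 + 1)) l).length = l.length := by
  induction ts generalizing l with
  | nil => rfl
  | cons t ts ih => rw [List.foldl_cons, ih]; simp

lemma bump_foldl_getD (ts : List Int) (l : List Int) (i : Nat) (hi : i < l.length)
    (hts : ∀ t ∈ ts, 0 ≤ t ∧ t.toNat < l.length) :
    (ts.foldl (fun l t => l.set t.toNat (l.getD t.toNat 0 + 1)) l).getD i 0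
      = l.getD i 0 + ts.count (i : Int) := by
  induction ts generalizing l with
  | nil => simp
  | cons t ts ih =>
    have ht := hts t (by simp)
    have hrec := ih (l.set t.toNat (l.getD t.toNat 0 + 1)) (by simpa using hi)
      (fun x hx => by simpa using hts x (List.mem_cons_of_mem _ hx))
    rw [List.foldl_cons, hrec, List.count_cons]
    by_cases hti : t = (i : Int)
    · have hti' : t.toNat = i := by omega
      rw [hti']
      have hlen' : i < (l.set i (l.getD i 0 + 1)).length := by simpa using hi
      rw [List.getD_eq_getElem _ _ hlen', List.getElem_set_self]
      rw [List.getD_eq_getElem _ _ hi]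
      simp [hti]
      omega
    · have hne : t.toNat ≠ i := by omega
      simp only [List.getD_eq_getElem?_getD, List.getElem?_set_ne hne]
      simp [hti]

-- the while loop of Source B consumes exactly the leading run equal to `shard`
lemma pvRun_eq (shard : Int) (l : List Int) :
    pvRun shard l = ((l.takeWhile (· == shard)).length, l.dropWhile (· == shard)) := by
  induction l with
  | nil => rfl
  | cons x xs ih =>
    by_cases hx : x = shard
    · simp [pvRun, hx, ih]
    · simp [pvRun, hx]

-- on a sorted list whose elements are all ≥ s, the leading run of s has length count s
lemma takeWhile_length_count (s : Int) (l : List Int)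
    (hs : l.Pairwise (· ≤ ·)) (hge : ∀ x ∈ l, s ≤ x) :
    ((l.takeWhile (· == s)).length : Int) = l.count s := by
  induction l with
  | nil => simp
  | cons x xs ih =>
    rcases List.pairwise_cons.mp hs with ⟨hx, hxs⟩
    by_cases hxe : x = s
    · subst hxe
      rw [List.takeWhile_cons]
      simp only [beq_self_eq_true, if_true, List.length_cons, List.count_cons_self]
      have h := ih hxs (fun y hy => hge y (List.mem_cons_of_mem _ hy))
      push_cast
      omega
    · have hlt : s < x := lt_of_le_of_ne (hge x (by simp)) (fun h => hxe h.symm)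
      have hnot : s ∉ x :: xs := by
        intro hmem
        rcases List.mem_cons.mp hmem with h | h
        · exact absurd h.symm hxe
        · exact absurd (hx s h) (not_le.mpr hlt)
      rw [List.takeWhile_cons]
      simp [hxe, List.count_eq_zero.mpr hnot]

lemma dropWhile_ge (s : Int) (l : List Int)
    (hs : l.Pairwise (· ≤ ·)) (hge : ∀ x ∈ l, s ≤ x) :
    ∀ x ∈ l.dropWhile (· == s), s + 1 ≤ x := by
  induction l with
  | nil => simp
  | cons y ys ih =>
    rcases List.pairwise_cons.mp hs with ⟨hy, hys⟩
    by_cases hye : y = s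
    · subst hye
      rw [List.dropWhile_cons]
      simpa using ih hys (fun x hx => hge x (List.mem_cons_of_mem _ hx))
    · have hlt : s < y := lt_of_le_of_ne (hge y (by simp)) (fun h => hye h.symm)
      rw [List.dropWhile_cons]
      simp only [hye, beq_iff_eq, if_false]
      intro x hx
      rcases List.mem_cons.mp hx with h | h
      · omega
      · have := hy x h; omega

lemma count_dropWhile (s t : Int) (l : List Int) (hne : t ≠ s) :
    (l.dropWhile (· == s)).count t = l.count t := by
  conv_rhs => rw [← List.takeWhile_append_dropWhile (p := (· == s)) (l := l)]
  rw [List.count_append]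
  have : (l.takeWhile (· == s)).count t = 0 := by
    apply List.count_eq_zero.mpr
    intro hmem
    have := List.mem_takeWhile_imp hmem
    exact hne (by simpa using this)
  omega

-- the sweep over range(num_shards) reads off the counts of the sorted list
lemma sweep_spec (k : Nat) (s : Int) (l : List Int) (acc : List Int)
    (hs : l.Pairwise (· ≤ ·)) (hge : ∀ x ∈ l, s ≤ x) :
    ((PySem.List.pyRange s (s + k) 1).foldl
        (fun st shard => let r := pvRun shard st.2; (st.1 ++ [(r.1 : Int)], r.2))
        (acc, l)).1
      = acc ++ (PySem.List.pyRange s (s + k) 1).map (fun sh => (l.count sh : Int)) := by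
  induction k generalizing s l acc with
  | zero =>
    simp [PySem.List.pyRange]
  | succ k ih =>
    have hcons : PySem.List.pyRange s (s + (k + 1)) 1 = s :: PySem.List.pyRange (s + 1) (s + (k + 1)) 1 := by
      apply PySem.List.pyRange_one_cons; omega
    have hc : ((k + 1 : Nat) : Int) = (k : Int) + 1 := by push_cast; ring
    rw [hc] at *
    rw [hcons, List.foldl_cons, List.map_cons]
    rw [show (let r := pvRun s (acc, l).2; ((acc, l).1 ++ [(r.1 : Int)], r.2))
        = (acc ++ [((l.takeWhile (· == s)).length : Int)], l.dropWhile (· == s)) from by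
      simp [pvRun_eq]]
    have hcount := takeWhile_length_count s l hs hge
    have hrest : s + (k + 1) = (s + 1) + k := by omega
    have hdrop_sorted : (l.dropWhile (· == s)).Pairwise (· ≤ ·) :=
      hs.sublist (List.dropWhile_sublist _)
    have hdrop_ge := dropWhile_ge s l hs hge
    rw [hrest]
    rw [ih (s + 1) (l.dropWhile (· == s)) (acc ++ [((l.takeWhile (· == s)).length : Int)])
        hdrop_sorted hdrop_ge]
    rw [hcount, List.append_assoc, List.singleton_append]
    congr 2
    apply List.map_congr_left
    intro sh hsh
    have hmem := (PySem.List.mem_pyRange_one).mp hsh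
    rw [count_dropWhile s sh l (by omega)]

-- ===== VERDICT (by name: the statement is the Claim_ definition above) =====
theorem expert_parallel_dispatch_stats_spec : Claim_equal_expert_parallel_dispatch_stats := by
  intro ths eas eps _ hpre
  obtain ⟨hlen, heps, hths, heas⟩ := hpre
  unfold Spec_expert_parallel_dispatch_stats
  unfold expert_parallel_dispatch_stats expert_parallel_dispatch_stats_alt
  by_cases hnil : ths = []
  · rw [if_pos hnil, if_pos hnil]
  · rw [if_neg hnil, if_neg hnil]
    set targets := eas.map (fun e => PySem.Int.floordiv e eps) with htargets
    have heasnil : eas ≠ [] := by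
      intro h; apply hnil; simpa [h] using hlen
    have htnil : targets ≠ [] := by simp [htargets, heasnil]
    set ns : Int := max ((PySem.List.max? ths (fun y => y)).getD 0)
        ((PySem.List.max? targets (fun y => y)).getD 0) + 1 with hns
    -- every target is in [0, ns)
    have htbound : ∀ t ∈ targets, 0 ≤ t ∧ t.toNat < ns.toNat := by
      intro t ht
      obtain ⟨e, he, rfl⟩ := List.mem_map.mp ht
      have h0 : 0 ≤ PySem.Int.floordiv e eps := by
        rw [PySem.Int.floordiv_eq_ediv_of_pos heps]
        exact Int.ediv_nonneg (heas e he) (le_of_lt heps)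
      obtain ⟨m, hm⟩ := Option.ne_none_iff_exists'.mp
        (fun hc => htnil ((PySem.List.max?_eq_none_iff targets (fun y => y)).mp hc))
      have hle := PySem.List.max?_isMax hm _ (List.mem_map_of_mem he)
      simp only [hm, Option.getD_some] at hns
      constructor
      · exact h0
      · simp only [hns]; omega
    have hns1 : 1 ≤ ns := by
      obtain ⟨t, ht⟩ := List.exists_mem_of_ne_nil targets htnil
      have := htbound t ht
      omega
    -- split A's fused pair loop into two independent loops
    rw [PySem.List.foldl_prod_mk
      (f := fun (l : List Int) (p : Int × Int) =>
        l.set (PySem.Int.floordiv p.2 eps).toNat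
          (l.getD (PySem.Int.floordiv p.2 eps).toNat 0 + 1))
      (g := fun (r : Int) (p : Int × Int) =>
        if PySem.Int.floordiv p.2 eps ≠ p.1 then r + 1 else r)]
    refine Prod.ext ?_ ?_
    · -- histogram component
      -- A's side: bump loop over targets
      have hzip : (ths.zip eas).foldl
          (fun l (p : Int × Int) =>
            l.set (PySem.Int.floordiv p.2 eps).toNat
              (l.getD (PySem.Int.floordiv p.2 eps).toNat 0 + 1))
          (List.replicate ns.toNat (0:Int))
          = targets.foldl (fun l t => l.set t.toNat (l.getD t.toNat 0 + 1))
              (List.replicate ns.toNat (0:Int)) := by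
        rw [htargets, List.foldl_map]
        have hsnd : (ths.zip eas).map Prod.snd = eas :=
          List.map_snd_zip (le_of_eq hlen.symm)
        calc (ths.zip eas).foldl _ _
            = ((ths.zip eas).map Prod.snd).foldl
                (fun l e => l.set (PySem.Int.floordiv e eps).toNat
                  (l.getD (PySem.Int.floordiv e eps).toNat 0 + 1))
                (List.replicate ns.toNat (0:Int)) := by rw [List.foldl_map]
          _ = _ := by rw [hsnd]
      -- B's side: the sweep over the sorted targets
      set ordered := PySem.List.sorted targets (fun y => y) false with hord
      have hperm : ordered.Perm targets := PySem.List.sorted_perm targets (fun y => y) false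
      have hsorted : ordered.Pairwise (· ≤ ·) := by
        simpa using PySem.List.sorted_pairwise targets (fun y => y)
      have hordge : ∀ x ∈ ordered, (0:Int) ≤ x := by
        intro x hx
        exact (htbound x (hperm.mem_iff.mp hx)).1
      have hsweep := sweep_spec ns.toNat 0 ordered [] hsorted (by simpa using hordge)
      have hns0 : (0:Int) + (ns.toNat : Int) = ns := by omega
      rw [hns0] at hsweep
      show (ths.zip eas).foldl _ (List.replicate ns.toNat (0:Int)) = _
      rw [hzip]
      rw [hsweep]
      rw [List.nil_append]
      apply List.ext_getElem
      · rw [bump_foldl_length]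
        simp [PySem.List.length_pyRange_one]
      · intro i h1 h2
        have hilen : i < ns.toNat := by
          simpa [PySem.List.length_pyRange_one] using h2
        have := bump_foldl_getD targets (List.replicate ns.toNat (0:Int)) i
          (by simpa using hilen)
          (by intro t ht; simpa using htbound t ht)
        rw [List.getD_eq_getElem _ _ h1] at this
        rw [this]
        rw [List.getElem_map, PySem.List.getElem_pyRange_one]
        simp [hperm.count_eq]
    · -- remote-dispatch component
      show (ths.zip eas).foldl _ (0:Int) =
        (ths.length : Int) - ((ths.zip targets).countP (fun p => p.1 == p.2) : Int)
      have hzt : ths.zip targets = (ths.zip eas).map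
          (fun p => (p.1, PySem.Int.floordiv p.2 eps)) := by
        rw [htargets, List.zip_map_right]; rfl
      rw [hzt, List.countP_map]
      rw [PySem.List.foldl_ite_add_one (p := fun p : Int × Int => PySem.Int.floordiv p.2 eps ≠ p.1)]
      rw [zero_add]
      have hlenzip : (ths.zip eas).length = ths.length := by
        rw [List.length_zip, hlen, Nat.min_self]
      have hsplit := List.length_eq_countP_add_countP
          (p := fun p : Int × Int => decide (PySem.Int.floordiv p.2 eps ≠ p.1))
          (l := ths.zip eas)
      have h1 : (ths.zip eas).countP ((fun p : Int × Int => p.1 == p.2) ∘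
              (fun p => (p.1, PySem.Int.floordiv p.2 eps)))
          = (ths.zip eas).countP
              (fun a => decide ¬ (decide (PySem.Int.floordiv a.2 eps ≠ a.1) = true)) := by
        apply List.countP_congr
        intro p _
        simp only [Function.comp, beq_iff_eq, decide_eq_true_eq, ne_eq, not_not]
        exact eq_comm
      omega
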